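-- pv_equiv track=rewrite | github.com/Alancaster67/AoC2015 | Day 19/Day 19.py | find_longest_replacements
-- ===== SOURCE A (Python) =====
-- def find_longest_replacements(ranked_replacements, med):
--
--     for to_replace, replace_with, rep_length in ranked_replacements:
--         replacement_length = 0
--         if to_replace in med:
--             replacement_length = rep_length
--             break
--
--     longest_replacements = [
--         (to_replace, replace_with)
--         for to_replace, replace_with, rep_length
--         in ranked_replacements
--         if rep_length == replacement_length]
--
--     if len(longest_replacements) == 0 :
--         raise ValueError("No valid replacements found")
--
--     return longest_replacements
-- ===== SOURCE B (Python) =====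
-- def find_longest_replacements(ranked_replacements, med):
--     # One pass: group rules by rep_length and spot the first rule applicable to med;
--     # then answer with a single bucket lookup.
--     groups = {}
--     target = None
--     for to_replace, replace_with, rep_length in ranked_replacements:
--         groups.setdefault(rep_length, []).append((to_replace, replace_with))
--         if target is None and to_replace in med:
--             target = rep_length
--     longest_replacements = groups.get(target if target is not None else 0, [])
--     if not longest_replacements:
--         raise ValueError("No valid replacements found")
--     return longest_replacements
-- ===== Notes on version B (the rewrite author's own statement) =====
-- stated objective: alternative
-- what changed: B makes a single pass that builds a dict grouping rules by rep_length while recording the first rule whose to_replace occurs in med, then returns that one bucket by lookup, instead of A's break-loop followed by a second full filtering pass.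
-- outside the precondition, e.g. on find_longest_replacements([], ''): A raises ValueError, B raises ValueError; on find_longest_replacements([('a', 'b', 2)], 'xyz'): A raises ValueError, B raises ValueError
import Mathlib
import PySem

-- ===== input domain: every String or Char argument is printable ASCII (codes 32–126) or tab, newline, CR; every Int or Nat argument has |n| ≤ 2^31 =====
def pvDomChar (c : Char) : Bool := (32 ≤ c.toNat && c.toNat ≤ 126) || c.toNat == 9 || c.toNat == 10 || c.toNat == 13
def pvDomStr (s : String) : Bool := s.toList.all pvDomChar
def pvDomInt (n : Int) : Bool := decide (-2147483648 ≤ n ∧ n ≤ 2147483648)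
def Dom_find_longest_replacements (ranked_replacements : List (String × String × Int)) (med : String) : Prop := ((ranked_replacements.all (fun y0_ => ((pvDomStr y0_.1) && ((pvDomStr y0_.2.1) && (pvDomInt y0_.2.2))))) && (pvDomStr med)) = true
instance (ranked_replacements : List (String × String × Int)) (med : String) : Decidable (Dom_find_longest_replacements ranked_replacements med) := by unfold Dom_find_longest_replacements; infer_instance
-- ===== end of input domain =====

-- B replaces A's break-loop plus second filtering pass by one pass building a rep_length-indexed
-- grouping dict alongside the first-match target, answered by a single bucket lookup (objective: alternative).


-- ===== PORT A =====
-- A's first loop: replacement_length ends as the rep_length of the first rule whose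
-- to_replace is a substring of med (break), else 0.
def pvALoop : List (String × String × Int) → String → Int
  | [], _ => 0
  | (to_replace, _, rep_length) :: rest, med =>
      if PySem.Str.isIn to_replace med then rep_length else pvALoop rest med

def find_longest_replacements (ranked_replacements : List (String × String × Int)) (med : String) : List (String × String) :=
  let replacement_length := pvALoop ranked_replacements med
  -- second pass: the list comprehension filtering by rep_length == replacement_length
  (ranked_replacements.filter (fun e => e.2.2 == replacement_length)).map (fun e => (e.1, e.2.1))
  -- 'raise ValueError' when this list is empty: excluded by Pre_find_longest_replacements

-- ===== PORT B =====
def find_longest_replacements_alt (ranked_replacements : List (String × String × Int)) (med : String) : List (String × String) :=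
  let st := ranked_replacements.foldl
    (fun (st : PySem.Dict Int (List (String × String)) × Option Int) e =>
      let groups := st.1.modify e.2.2 [] (fun l => l ++ [(e.1, e.2.1)])  -- setdefault(...).append(...)
      let target := match st.2 with
        | some t => some t
        | none => if PySem.Str.isIn e.1 med then some e.2.2 else none
      (groups, target))
    (PySem.Dict.empty, none)
  st.1.getD (st.2.getD 0) []
  -- 'raise ValueError' when this bucket is empty: excluded by Pre_find_longest_replacements

-- ===== PRECONDITION & SPEC =====
-- Pre_ excludes exactly the inputs on which A raises ValueError: those where no rule's
-- rep_length equals the target length (first applicable rule's length, else 0); B raises there too.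
def Pre_find_longest_replacements (ranked_replacements : List (String × String × Int)) (med : String) : Prop :=
  ∃ e ∈ ranked_replacements,
    e.2.2 = ((ranked_replacements.find? (fun e => PySem.Str.isIn e.1 med)).map (·.2.2)).getD 0
instance (ranked_replacements : List (String × String × Int)) (med : String) : Decidable (Pre_find_longest_replacements ranked_replacements med) := by unfold Pre_find_longest_replacements; infer_instance

def pvWitness_find_longest_replacements : (List (String × String × Int)) × String := ([("a", "bb", 1)], "xa")

def Spec_find_longest_replacements (ranked_replacements : List (String × String × Int)) (med : String) (out : List (String × String)) : Prop := out = find_longest_replacements_alt ranked_replacements med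
instance (ranked_replacements : List (String × String × Int)) (med : String) (out : List (String × String)) : Decidable (Spec_find_longest_replacements ranked_replacements med out) := by unfold Spec_find_longest_replacements; infer_instance

-- ===== CLAIM (what is proved, stated in full; the proofs are below) =====
def Claim_equal_find_longest_replacements : Prop := ∀ (ranked_replacements : List (String × String × Int)) (med : String), Dom_find_longest_replacements ranked_replacements med → Pre_find_longest_replacements ranked_replacements med → Spec_find_longest_replacements ranked_replacements med (find_longest_replacements ranked_replacements med)

-- ===== LEMMAS AND PROOFS =====

-- B's pair-fold splits into its two component folds.
theorem pvFold_split (rr : List (String × String × Int)) (med : String)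
    (d : PySem.Dict Int (List (String × String))) (t : Option Int) :
    rr.foldl
      (fun (st : PySem.Dict Int (List (String × String)) × Option Int) e =>
        (st.1.modify e.2.2 [] (fun l => l ++ [(e.1, e.2.1)]),
         match st.2 with
         | some t => some t
         | none => if PySem.Str.isIn e.1 med then some e.2.2 else none))
      (d, t)
    = (rr.foldl (fun d e => d.modify e.2.2 [] (fun l => l ++ [(e.1, e.2.1)])) d,
       rr.foldl (fun t e =>
         match t with
         | some t => some t
         | none => if PySem.Str.isIn e.1 med then some e.2.2 else none) t) := by
  induction rr generalizing d t with
  | nil => rfl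
  | cons e rest ih => simp only [List.foldl_cons]; exact ih _ _

-- The target fold keeps an already-found target.
theorem pvTargetFold_some (rr : List (String × String × Int)) (med : String) (x : Int) :
    rr.foldl (fun t e =>
      match t with
      | some t => some t
      | none => if PySem.Str.isIn e.1 med then some e.2.2 else none) (some x) = some x := by
  induction rr with
  | nil => rfl
  | cons e rest ih => simpa using ih

-- Started from none, the target fold computes A's replacement_length (default 0).
theorem pvTargetFold_eq_aLoop (rr : List (String × String × Int)) (med : String) :
    (rr.foldl (fun t e =>
      match t with
      | some t => some t
      | none => if PySem.Str.isIn e.1 med then some e.2.2 else none) none).getD 0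
    = pvALoop rr med := by
  induction rr with
  | nil => rfl
  | cons e rest ih =>
      obtain ⟨t1, t2, l⟩ := e
      simp only [List.foldl_cons, pvALoop]
      by_cases h : PySem.Str.isIn t1 med = true
      · rw [if_pos h, if_pos h, pvTargetFold_some]; rfl
      · rw [if_neg h, if_neg h]; exact ih

-- The grouping fold's bucket at any key is the filtered projection of the input list.
theorem pvGroups_getD (rr : List (String × String × Int)) (c : Int) :
    (rr.foldl (fun d e => d.modify e.2.2 [] (fun l => l ++ [(e.1, e.2.1)])) PySem.Dict.empty).getD c []
    = (rr.filter (fun e => e.2.2 == c)).map (fun e => (e.1, e.2.1)) := by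
  have hmap : rr.foldl (fun d e => d.modify e.2.2 [] (fun l => l ++ [(e.1, e.2.1)])) PySem.Dict.empty
      = (rr.map (fun e => (e.2.2, (e.1, e.2.1)))).foldl
          (fun d p => d.modify p.1 [] (fun l => l ++ [p.2])) PySem.Dict.empty := by
    rw [List.foldl_map]
  rw [hmap, PySem.Dict.getD_foldl_modify_append, PySem.Dict.getD_empty, List.filter_map]
  simp [List.map_map, Function.comp_def]

-- ===== VERDICT (by name: the statement is the Claim_ definition above) =====
theorem find_longest_replacements_spec : Claim_equal_find_longest_replacements := by
  intro rr med _ _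
  unfold Spec_find_longest_replacements
  simp only [find_longest_replacements, find_longest_replacements_alt, pvFold_split,
    pvGroups_getD, pvTargetFold_eq_aLoop]
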